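-- pv_equiv track=rewrite | github.com/noisebridge/nb_whiteboarding | 2018-12-26/nchoosek/n_choose_k_by_trailing_subprobs.py | gen_n_choose_k_bitsets
-- ===== SOURCE A (Python) =====
-- def gen_n_choose_k_bitsets(n, k):
--     def enum_n_choose_k_bitsets_by_subproblems(start, num_to_choose):
--         if start == n:
--             if num_to_choose == 0:
--                 yield 0
--         else:
--             num_remaining = n - start
--
--             if num_to_choose > 0 and num_to_choose <= num_remaining:
--                 # Choose it...
--                 for rest in enum_n_choose_k_bitsets_by_subproblems(
--                         start + 1, num_to_choose - 1):
--                     yield (1 << start) | rest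
--
--             if num_to_choose <= num_remaining - 1:
--                 # ...or don't.
--                 for rest in enum_n_choose_k_bitsets_by_subproblems(
--                         start + 1, num_to_choose):
--                     yield rest
--
--     for bitset in enum_n_choose_k_bitsets_by_subproblems(0, k):
--         yield bitset
-- ===== SOURCE B (Python) =====
-- def gen_n_choose_k_bitsets(n, k):
--     # Bottom-up dynamic programming over the start position (no recursion):
--     # rows[c] holds the bitset list for the subproblem (start, c); we sweep
--     # start from n down to 0 and finally yield the row for k.
--     if k < 0 or k > n:
--         return
--     rows = [[0]] + [[] for _ in range(k)]
--     for start in range(n - 1, -1, -1):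
--         rem = n - start
--         new_rows = []
--         for c in range(k + 1):
--             cur = []
--             if c > 0 and c <= rem:
--                 bit = 1 << start
--                 cur.extend(bit | r for r in rows[c - 1])
--             if c <= rem - 1:
--                 cur.extend(rows[c])
--             new_rows.append(cur)
--         rows = new_rows
--     yield from rows[k]
-- ===== Notes on version B (the rewrite author's own statement) =====
-- stated objective: alternative
-- what changed: Replaces A's recursive generator (top-down recursion on the start position with nested yields) by a bottom-up dynamic-programming sweep that builds the rows of subproblem results iteratively from start=n down to 0, so B uses no recursion.
-- outside the precondition, e.g. on gen_n_choose_k_bitsets(9901, 0): A returns [0], B returns [0]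
import Mathlib
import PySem

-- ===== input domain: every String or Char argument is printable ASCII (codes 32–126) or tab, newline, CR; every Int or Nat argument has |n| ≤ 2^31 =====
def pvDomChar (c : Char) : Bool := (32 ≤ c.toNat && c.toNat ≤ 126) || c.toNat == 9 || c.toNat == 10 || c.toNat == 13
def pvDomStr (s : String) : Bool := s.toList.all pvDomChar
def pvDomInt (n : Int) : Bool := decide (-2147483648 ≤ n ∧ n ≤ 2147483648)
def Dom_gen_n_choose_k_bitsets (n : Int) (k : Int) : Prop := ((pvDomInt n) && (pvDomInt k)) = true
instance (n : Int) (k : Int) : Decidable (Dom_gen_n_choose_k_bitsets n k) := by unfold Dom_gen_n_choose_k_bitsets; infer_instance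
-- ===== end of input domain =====

-- B replaces A's recursive generator by a bottom-up dynamic-programming sweep over the start
-- position (no recursion); the two ports are proved to return the same list on every input.


-- ===== PORT A =====
-- inner generator `enum_n_choose_k_bitsets_by_subproblems`, with a fuel argument that only
-- makes the recursion structural (the top-level call passes enough fuel for every path).
-- `(1 << start) | rest` is ported as `Int.lor (1 <<< start.toNat) r` (start ≥ 0 whenever this
-- branch runs, since start counts up from 0 and the branch needs 0 < c ≤ n - start).
def pvEnumA (n : Int) : Nat → Int → Int → List Int
  | 0, _, _ => []
  | fuel+1, start, c =>
    if start = n then (if c = 0 then [0] else [])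
    else
      let rem := n - start
      (if 0 < c ∧ c ≤ rem then
        (pvEnumA n fuel (start+1) (c-1)).map (fun r => Int.lor ((1 <<< start.toNat : Nat) : Int) r)
       else [])
      ++ (if c ≤ rem - 1 then pvEnumA n fuel (start+1) c else [])

def gen_n_choose_k_bitsets (n : Int) (k : Int) : List Int :=
  pvEnumA n (n.toNat + (n-k).toNat + 1) 0 k

-- ===== PORT B =====
-- one sweep step: from the rows for position start+1 build the rows for position start
def pvAltStep (n : Int) (kN : Nat) (rows : List (List Int)) (start : Int) : List (List Int) :=
  (List.range (kN+1)).map (fun (c : Nat) =>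
    (if 0 < (c:Int) ∧ (c:Int) ≤ n - start then
       (rows.getD (c-1) []).map (fun r => Int.lor ((1 <<< start.toNat : Nat) : Int) r)
     else [])
    ++ (if (c:Int) ≤ n - start - 1 then rows.getD c [] else []))

def gen_n_choose_k_bitsets_alt (n : Int) (k : Int) : List Int :=
  if k < 0 ∨ n < k then []
  else
    ((PySem.List.pyRange (n-1) (-1) (-1)).foldl (pvAltStep n k.toNat)
      ([0] :: List.replicate k.toNat [])).getD k.toNat []

-- ===== PRECONDITION & SPEC =====
-- Pre_ excludes exactly the inputs on which Python A's recursion (depth n+1 for 0 <= k <= n or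
-- k < 0 <= n, depth n-k for n < 0 and k <= n-1) reaches CPython's recursion limit and A raises
-- RecursionError; the exact cutoff depends on the recursion limit in force and the ambient stack
-- depth (~9997 under the check harness's limit of 10000), so the bound 9900 leaves a thin band of
-- deep-but-still-returning inputs outside Pre_ as well (see the claim's cites).
def Pre_gen_n_choose_k_bitsets (n : Int) (k : Int) : Prop :=
  (n ≤ 9900 ∨ (0 ≤ k ∧ n < k)) ∧ (0 ≤ n ∨ n ≤ k ∨ n - k ≤ 9900)
instance (n : Int) (k : Int) : Decidable (Pre_gen_n_choose_k_bitsets n k) := by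
  unfold Pre_gen_n_choose_k_bitsets; infer_instance

def pvWitness_gen_n_choose_k_bitsets : Int × Int := (4, 2)

def Spec_gen_n_choose_k_bitsets (n : Int) (k : Int) (out : List Int) : Prop := out = gen_n_choose_k_bitsets_alt n k
instance (n : Int) (k : Int) (out : List Int) : Decidable (Spec_gen_n_choose_k_bitsets n k out) := by unfold Spec_gen_n_choose_k_bitsets; infer_instance

-- ===== CLAIM (what is proved, stated in full; the proofs are below) =====
def Claim_equal_gen_n_choose_k_bitsets : Prop := ∀ (n : Int) (k : Int), Dom_gen_n_choose_k_bitsets n k → Pre_gen_n_choose_k_bitsets n k → Spec_gen_n_choose_k_bitsets n k (gen_n_choose_k_bitsets n k)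


-- ===== LEMMAS AND PROOFS =====

-- fuel irrelevance (for nonnegative num_to_choose, depth is bounded by n - s)
theorem pvEnumA_stable (n : Int) : ∀ (F₁ : Nat) (F₂ : Nat) (s c : Int), 0 ≤ c →
    (n-s).toNat < F₁ → (n-s).toNat < F₂ →
    pvEnumA n F₁ s c = pvEnumA n F₂ s c := by
  intro F₁
  induction F₁ with
  | zero => intro F₂ s c _ h1 _; omega
  | succ F ih =>
    intro F₂ s c hc h1 h2
    cases F₂ with
    | zero => omega
    | succ G =>
      simp only [pvEnumA]
      by_cases hs : s = n
      · simp [hs]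
      · simp only [if_neg hs]
        congr 1
        · by_cases hcc : 0 < c ∧ c ≤ n - s
          · simp only [if_pos hcc]
            rw [ih G (s+1) (c-1) (by omega) (by omega) (by omega)]
          · simp [hcc]
        · by_cases hcc : c ≤ n - s - 1
          · simp only [if_pos hcc]
            exact ih G (s+1) c hc (by omega) (by omega)
          · simp [hcc]

-- negative num_to_choose is never satisfiable: A yields nothing
theorem pvEnumA_neg (n : Int) : ∀ (F : Nat) (s c : Int), c < 0 → pvEnumA n F s c = [] := by
  intro F
  induction F with
  | zero => intro s c _; rfl
  | succ F ih =>
    intro s c hc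
    simp only [pvEnumA]
    by_cases hs : s = n
    · simp [hs, show ¬ c = 0 by omega]
    · simp only [if_neg hs]
      rw [if_neg (by omega : ¬ (0 < c ∧ c ≤ n - s)), ih (s+1) c hc]
      simp

-- rows of A-values with fuel F at position s (proof-only helper)
def pvRowsAt (n k : Int) (F : Nat) (s : Int) : List (List Int) :=
  (List.range (k.toNat+1)).map (fun (c : Nat) => pvEnumA n F s (c:Int))

-- one sweep step of B computes exactly A's rows one position down (one fuel unit up)
theorem pvAltStep_rowsAt (n k : Int) (F : Nat) (s : Int) (hs : s ≠ n) :
    pvAltStep n k.toNat (pvRowsAt n k F (s+1)) s = pvRowsAt n k (F+1) s := by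
  unfold pvAltStep pvRowsAt
  apply List.map_congr_left
  intro c hc
  rw [List.mem_range] at hc
  conv_rhs => rw [pvEnumA]
  rw [if_neg hs]
  congr 1
  · by_cases hcc : 0 < (c:Int) ∧ (c:Int) ≤ n - s
    · rw [if_pos hcc, if_pos hcc]
      rw [List.getD_eq_getElem _ _ (by simp; omega)]
      simp only [List.getElem_map, List.getElem_range]
      rw [show ((c - 1 : Nat) : Int) = (c:Int) - 1 by omega]
    · rw [if_neg hcc, if_neg hcc]
  · by_cases hcc : (c:Int) ≤ n - s - 1
    · rw [if_pos hcc, if_pos hcc]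
      rw [List.getD_eq_getElem _ _ (by simpa using hc)]
      simp only [List.getElem_map, List.getElem_range]
    · rw [if_neg hcc, if_neg hcc]

-- the rows at position n are B's initial rows
theorem pvRowsAt_base (n k : Int) (F : Nat) :
    pvRowsAt n k (F+1) n = [0] :: List.replicate k.toNat [] := by
  unfold pvRowsAt
  rw [List.range_succ_eq_map, List.map_cons, List.map_map]
  congr 1
  · simp [pvEnumA]
  · rw [List.eq_replicate_iff]
    refine ⟨by simp, ?_⟩
    intro b hb
    rw [List.mem_map] at hb
    obtain ⟨c, _, rfl⟩ := hb
    simp only [Function.comp, pvEnumA]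
    rw [if_neg (by omega : ¬ ((c+1 : Nat) : Int) = 0)]
    simp

-- folding B's sweep from position m-1 down to 0 turns rows at m into rows at 0
theorem pvFold_inv (n k : Int) (_hn : (n:Int) ≥ 0) :
    ∀ (m : Nat) (F : Nat), (m : Int) ≤ n →
    (PySem.List.pyRange ((m:Int)-1) (-1) (-1)).foldl (pvAltStep n k.toNat) (pvRowsAt n k F m)
      = pvRowsAt n k (F+m) 0 := by
  intro m
  induction m with
  | zero =>
    intro F _
    rw [PySem.List.pyRange_neg_one_eq_nil (by omega)]
    simp
  | succ m ih =>
    intro F hm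
    have hm' : ((m+1 : Nat) : Int) = (m:Int) + 1 := by push_cast; ring
    rw [show ((m+1 : Nat) : Int) - 1 = (m : Int) by omega,
      PySem.List.pyRange_neg_one_cons (by omega : (-1:Int) < (m:Int)), List.foldl_cons,
      show pvRowsAt n k F ((m+1 : Nat) : Int) = pvRowsAt n k F ((m:Int)+1) by rw [hm'],
      pvAltStep_rowsAt n k F (m:Int) (by omega), ih (F+1) (by omega)]
    congr 1
    omega

-- the two ports agree on every input (unconditionally)
theorem pvPorts_eq (n k : Int) : gen_n_choose_k_bitsets n k = gen_n_choose_k_bitsets_alt n k := by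
  unfold gen_n_choose_k_bitsets gen_n_choose_k_bitsets_alt
  by_cases hguard : k < 0 ∨ n < k
  · rw [if_pos hguard]
    by_cases hk : k < 0
    · exact pvEnumA_neg n _ 0 k hk
    · -- here n < k and 0 ≤ k: one unfold shows both of A's guards false
      have hnk : n < k := by tauto
      simp only [pvEnumA]
      by_cases hn0 : (0:Int) = n
      · rw [if_pos hn0, if_neg (by omega : ¬ k = 0)]
      · rw [if_neg hn0, if_neg (by omega : ¬ (0 < k ∧ k ≤ n - 0)),
          if_neg (by omega : ¬ k ≤ n - 0 - 1)]
        rfl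
  · rw [if_neg hguard]
    have hk : 0 ≤ k := by omega
    have hkn : k ≤ n := by omega
    have hn : 0 ≤ n := by omega
    rw [show ([0] :: List.replicate k.toNat [] : List (List Int)) = pvRowsAt n k (0+1) n
        from (pvRowsAt_base n k 0).symm,
      show (n - 1 : Int) = ((n.toNat : Nat) : Int) - 1 by omega,
      show pvRowsAt n k (0+1) n = pvRowsAt n k (0+1) ((n.toNat : Nat) : Int) by
        congr 1; omega,
      pvFold_inv n k (by omega) n.toNat (0+1) (by omega)]
    unfold pvRowsAt
    rw [List.getD_eq_getElem _ _ (by simp)]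
    simp only [List.getElem_map, List.getElem_range]
    rw [show ((k.toNat : Nat) : Int) = k by omega]
    exact pvEnumA_stable n _ _ 0 k hk (by omega) (by omega)

-- ===== VERDICT (by name: the statement is the Claim_ definition above) =====
-- ===== VERDICT (by name: the statement is the Claim_ definition above) =====
theorem gen_n_choose_k_bitsets_spec : Claim_equal_gen_n_choose_k_bitsets := by
  intro n k _ _
  exact pvPorts_eq n k
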